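-- pv_equiv track=rewrite | github.com/z1chh/Challenges | src/Kattis/Website/Ad Hoc/aprizenoonecanwin.py | aPrizeNoOneCanWin
-- ===== SOURCE A (Python) =====
-- def aPrizeNoOneCanWin(numItems, maxCost, items):
--     # Check if only one item
--     if numItems == 1:
--         return 1
--
--     # Sort items by price ascending
--     items.sort()
--
--     # Check if two consecutive items exceed the max cost
--     for i in range(numItems - 1):
--         if items[i] + items[i + 1] > maxCost:
--             return i + 1
--
--     # Otherwise, all items can be used
--     return numItems
-- ===== SOURCE B (Python) =====
-- def aPrizeNoOneCanWin(numItems, maxCost, items):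
--     # Binary search for the first adjacent pair exceeding maxCost: pair sums
--     # are non-decreasing on the sorted list. Sorts items in place like A
--     # (A skips the sort only when numItems == 1; return value is unaffected).
--     items.sort()
--     if numItems < 2:
--         return numItems
--     lo, hi = 0, numItems - 1
--     while lo < hi:
--         mid = (lo + hi) // 2
--         if items[mid] + items[mid + 1] > maxCost:
--             hi = mid
--         else:
--             lo = mid + 1
--     return lo + 1 if lo < numItems - 1 else numItems
-- ===== Notes on version B (the rewrite author's own statement) =====
-- stated objective: alternative
-- what changed: Replaces A's linear scan over adjacent pairs with a binary search for the first adjacent pair whose sum exceeds maxCost, valid because pair sums are non-decreasing on the sorted list; the in-place sort is kept and dominates the cost, so this was measured at ~1.4x, below the 1.5x bar.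
-- outside the precondition, e.g. on aPrizeNoOneCanWin(3, 0, [5, 6]): A returns 1, B raises IndexError
import Mathlib
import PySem

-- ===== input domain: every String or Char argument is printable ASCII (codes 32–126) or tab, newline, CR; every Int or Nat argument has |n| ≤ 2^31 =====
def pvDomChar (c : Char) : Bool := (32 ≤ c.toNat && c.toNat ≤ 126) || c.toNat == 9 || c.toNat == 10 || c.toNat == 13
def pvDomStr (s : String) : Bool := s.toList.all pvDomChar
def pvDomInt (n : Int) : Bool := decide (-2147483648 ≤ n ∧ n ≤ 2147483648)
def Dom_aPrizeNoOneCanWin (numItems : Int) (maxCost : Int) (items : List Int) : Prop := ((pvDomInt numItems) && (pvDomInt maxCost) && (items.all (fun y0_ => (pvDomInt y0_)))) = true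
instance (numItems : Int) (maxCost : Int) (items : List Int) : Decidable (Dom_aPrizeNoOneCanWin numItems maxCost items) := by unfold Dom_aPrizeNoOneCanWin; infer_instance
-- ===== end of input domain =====

set_option maxRecDepth 4000


-- B replaces A's linear scan over adjacent pairs of the sorted list by a binary
-- search for the first pair whose sum exceeds maxCost (objective: alternative;
-- the in-place sort is kept and dominates the cost).
-- Like A, B sorts `items` in place (A skips the sort only when numItems == 1);
-- the theorems below are about the return value.

-- ===== PORT A =====
-- A's for-loop over range(numItems - 1) with early return:
def aScan (maxCost : Int) (s : List Int) (numItems : Int) : List Int → Int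
  | [] => numItems
  | i :: rest =>
      if PySem.List.pyGetD s i 0 + PySem.List.pyGetD s (i + 1) 0 > maxCost then i + 1
      else aScan maxCost s numItems rest

def aPrizeNoOneCanWin (numItems : Int) (maxCost : Int) (items : List Int) : Int :=
  if numItems = 1 then 1
  else
    let s := PySem.List.sorted items (fun x => x) false
    aScan maxCost s numItems (PySem.List.pyRange 0 (numItems - 1) 1)

-- ===== PORT B =====
-- B's while-loop: binary search for the first index with items[i]+items[i+1] > maxCost
def bsLoop (maxCost : Int) (s : List Int) (lo hi : Int) : Int :=
  if h : lo < hi then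
    let mid := PySem.Int.floordiv (lo + hi) 2
    if PySem.List.pyGetD s mid 0 + PySem.List.pyGetD s (mid + 1) 0 > maxCost then
      bsLoop maxCost s lo mid
    else
      bsLoop maxCost s (mid + 1) hi
  else lo
termination_by (hi - lo).toNat
decreasing_by
  · have h1 : PySem.Int.floordiv (lo + hi) 2 < hi := by
      rw [PySem.Int.floordiv_lt_iff_lt_mul (by omega)]; omega
    have h2 : lo ≤ PySem.Int.floordiv (lo + hi) 2 := by
      rw [PySem.Int.le_floordiv_iff_mul_le (by omega)]; omega
    omega
  · have h1 : PySem.Int.floordiv (lo + hi) 2 < hi := by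
      rw [PySem.Int.floordiv_lt_iff_lt_mul (by omega)]; omega
    have h2 : lo ≤ PySem.Int.floordiv (lo + hi) 2 := by
      rw [PySem.Int.le_floordiv_iff_mul_le (by omega)]; omega
    omega

def aPrizeNoOneCanWin_alt (numItems : Int) (maxCost : Int) (items : List Int) : Int :=
  let s := PySem.List.sorted items (fun x => x) false
  if numItems < 2 then numItems
  else
    let lo := bsLoop maxCost s 0 (numItems - 1)
    if lo < numItems - 1 then lo + 1 else numItems

-- ===== PRECONDITION & SPEC =====
-- Pre_ restricts to the natural domain numItems ≤ len(items) (plus A's special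
-- case numItems = 1): when numItems exceeds the list length, A raises
-- IndexError unless an early pair already violates the bound, in which case
-- A's value depends on indices that do not exist for B's search; such inputs
-- (e.g. (3, 0, [5, 6]), where A returns 1 and B raises) are excluded.
def Pre_aPrizeNoOneCanWin (numItems : Int) (maxCost : Int) (items : List Int) : Prop :=
  numItems = 1 ∨ numItems ≤ (items.length : Int)
instance (numItems : Int) (maxCost : Int) (items : List Int) : Decidable (Pre_aPrizeNoOneCanWin numItems maxCost items) := by unfold Pre_aPrizeNoOneCanWin; infer_instance

def pvWitness_aPrizeNoOneCanWin : Int × Int × List Int := (4, 10, [3, 7, 2, 5])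

def Spec_aPrizeNoOneCanWin (numItems : Int) (maxCost : Int) (items : List Int) (out : Int) : Prop := out = aPrizeNoOneCanWin_alt numItems maxCost items
instance (numItems : Int) (maxCost : Int) (items : List Int) (out : Int) : Decidable (Spec_aPrizeNoOneCanWin numItems maxCost items out) := by unfold Spec_aPrizeNoOneCanWin; infer_instance

-- ===== CLAIM (what is proved, stated in full; the proofs are below) =====
def Claim_equal_aPrizeNoOneCanWin : Prop := ∀ (numItems : Int) (maxCost : Int) (items : List Int), Dom_aPrizeNoOneCanWin numItems maxCost items → Pre_aPrizeNoOneCanWin numItems maxCost items → Spec_aPrizeNoOneCanWin numItems maxCost items (aPrizeNoOneCanWin numItems maxCost items)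

-- ===== LEMMAS AND PROOFS =====

-- the pair predicate both loops test
def pvP (maxCost : Int) (s : List Int) (i : Int) : Bool :=
  decide (PySem.List.pyGetD s i 0 + PySem.List.pyGetD s (i + 1) 0 > maxCost)

-- first index in [lo, hi) where pvP holds, else hi (reference linear search)
def firstV (p : Int → Bool) (lo hi : Int) : Int :=
  if lo < hi then (if p lo then lo else firstV p (lo + 1) hi) else hi
termination_by (hi - lo).toNat
decreasing_by omega

theorem firstV_cut_true (p : Int → Bool) (lo mid hi : Int)
    (hlm : lo ≤ mid) (hmh : mid < hi) (hp : p mid = true) :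
    firstV p lo hi = firstV p lo mid := by
  generalize hfuel : (mid - lo).toNat = fuel
  induction fuel generalizing lo with
  | zero =>
      have he : lo = mid := by omega
      subst he
      have hR : firstV p lo lo = lo := by rw [firstV]; simp
      rw [firstV, hR]
      simp [hmh, hp]
  | succ n ih =>
      have hlm' : lo < mid := by omega
      have hL : firstV p lo hi = if p lo then lo else firstV p (lo + 1) hi := by
        rw [firstV]; simp [show lo < hi by omega]
      have hR : firstV p lo mid = if p lo then lo else firstV p (lo + 1) mid := by
        rw [firstV]; simp [hlm']
      rw [hL, hR]
      by_cases hl : p lo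
      · simp [hl]
      · simp only [hl, if_false]
        exact ih (lo + 1) (by omega) (by omega)

theorem firstV_cut_false (p : Int → Bool) (lo mid hi : Int)
    (hlm : lo ≤ mid) (hmh : mid < hi)
    (hfalse : ∀ k, lo ≤ k → k ≤ mid → p k = false) :
    firstV p lo hi = firstV p (mid + 1) hi := by
  generalize hfuel : (mid - lo).toNat = fuel
  induction fuel generalizing lo with
  | zero =>
      have : lo = mid := by omega
      subst this
      rw [firstV]
      simp [show lo < hi by omega, hfalse lo le_rfl le_rfl]
  | succ n ih =>
      rw [firstV]
      simp only [show lo < hi by omega, if_true, hfalse lo le_rfl (by omega), if_false,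
        Bool.false_eq_true, reduceIte]
      exact ih (lo + 1) (by omega) (fun k h1 h2 => hfalse k (by omega) h2) (by omega)

theorem bsLoop_eq_firstV_aux (maxCost : Int) (s : List Int) :
    ∀ (fuel : Nat) (lo hi : Int), (hi - lo).toNat ≤ fuel → lo ≤ hi →
      (∀ i j, lo ≤ i → i ≤ j → j < hi → pvP maxCost s i = true → pvP maxCost s j = true) →
      bsLoop maxCost s lo hi = firstV (pvP maxCost s) lo hi := by
  intro fuel
  induction fuel with
  | zero =>
      intro lo hi hf h _
      have he : lo = hi := by omega
      subst he
      rw [bsLoop, firstV]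
      simp
  | succ n ih =>
      intro lo hi hf h mono
      by_cases hlt : lo < hi
      · have hmid1 : lo ≤ PySem.Int.floordiv (lo + hi) 2 := by
          rw [PySem.Int.le_floordiv_iff_mul_le (by omega)]; omega
        have hmid2 : PySem.Int.floordiv (lo + hi) 2 < hi := by
          rw [PySem.Int.floordiv_lt_iff_lt_mul (by omega)]; omega
        rw [bsLoop]
        simp only [hlt, dif_pos]
        set mid := PySem.Int.floordiv (lo + hi) 2 with hmid
        by_cases hp : PySem.List.pyGetD s mid 0 + PySem.List.pyGetD s (mid + 1) 0 > maxCost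
        · simp only [hp, if_true, reduceIte]
          rw [ih lo mid (by omega) (by omega)
            (fun i j h1 h2 h3 => mono i j h1 h2 (by omega))]
          exact (firstV_cut_true _ lo mid hi hmid1 hmid2 (by simp [pvP, hp])).symm
        · simp only [hp, if_false, reduceIte]
          have hfalse : ∀ k, lo ≤ k → k ≤ mid → pvP maxCost s k = false := by
            intro k h1 h2
            by_contra hk
            have hk' : pvP maxCost s k = true := by
              cases hkk : pvP maxCost s k <;> simp_all
            have := mono k mid h1 h2 (by omega) hk'
            simp [pvP, hp] at this
          rw [ih (mid + 1) hi (by omega) (by omega)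
            (fun i j h1 h2 h3 => mono i j (by omega) h2 h3)]
          exact (firstV_cut_false _ lo mid hi hmid1 hmid2 hfalse).symm
      · have he : lo = hi := by omega
        subst he
        rw [bsLoop, firstV]
        simp

theorem bsLoop_eq_firstV (maxCost : Int) (s : List Int) (lo hi : Int) (h : lo ≤ hi)
    (mono : ∀ i j, lo ≤ i → i ≤ j → j < hi → pvP maxCost s i = true → pvP maxCost s j = true) :
    bsLoop maxCost s lo hi = firstV (pvP maxCost s) lo hi :=
  bsLoop_eq_firstV_aux maxCost s (hi - lo).toNat lo hi le_rfl h mono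

theorem aScan_eq_firstV (maxCost : Int) (s : List Int) (numItems lo hi : Int) (h : lo ≤ hi) :
    aScan maxCost s numItems (PySem.List.pyRange lo hi 1) =
      if firstV (pvP maxCost s) lo hi < hi then firstV (pvP maxCost s) lo hi + 1 else numItems := by
  generalize hfuel : (hi - lo).toNat = fuel
  induction fuel generalizing lo with
  | zero =>
      rw [PySem.List.pyRange_one_eq_nil (by omega), firstV]
      simp [show ¬ (lo < hi) by omega, aScan]
  | succ n ih =>
      have hlt : lo < hi := by omega
      rw [PySem.List.pyRange_one_cons hlt, firstV]
      simp only [hlt, if_true, reduceIte, aScan]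
      by_cases hp : PySem.List.pyGetD s lo 0 + PySem.List.pyGetD s (lo + 1) 0 > maxCost
      · simp [hp, pvP, hlt]
      · simp only [hp, if_false, reduceIte, show pvP maxCost s lo = false by simp [pvP, hp],
          Bool.false_eq_true]
        exact ih (lo + 1) (by omega) (by omega)

theorem pvP_mono (maxCost : Int) (items : List Int) (numItems : Int)
    (hlen : numItems ≤ (items.length : Int)) :
    ∀ i j, 0 ≤ i → i ≤ j → j < numItems - 1 →
      pvP maxCost (PySem.List.sorted items (fun x => x) false) i = true →
      pvP maxCost (PySem.List.sorted items (fun x => x) false) j = true := by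
  intro i j h0 hij hj hp
  generalize hs : PySem.List.sorted items (fun x => x) false = s at hp ⊢
  have hslen : (s.length : Int) = (items.length : Int) := by
    rw [← hs, PySem.List.length_sorted]
  have hpair : s.Pairwise (· ≤ ·) := by
    rw [← hs]; exact PySem.List.sorted_pairwise items (fun x => x)
  have hmono : ∀ (a b : Nat) (ha : a < s.length) (hb : b < s.length), a ≤ b → s[a] ≤ s[b] := by
    intro a b ha hb hab
    rcases Nat.lt_or_ge a b with hlt | hge
    · exact (List.pairwise_iff_getElem.mp hpair) a b ha hb hlt
    · have : a = b := by omega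
      subst this; exact le_refl _
  have hi1 : i < (s.length : Int) := by omega
  have hj1 : j + 1 < (s.length : Int) := by omega
  have e1 := PySem.List.pyGetD_eq_getElem s (i := i) 0 h0 (by omega)
  have e2 := PySem.List.pyGetD_eq_getElem s (i := i + 1) 0 (by omega) (by omega)
  have e3 := PySem.List.pyGetD_eq_getElem s (i := j) 0 (by omega) (by omega)
  have e4 := PySem.List.pyGetD_eq_getElem s (i := j + 1) 0 (by omega) (by omega)
  unfold pvP at hp ⊢
  rw [decide_eq_true_eq] at hp ⊢
  rw [e1, e2] at hp
  rw [e3, e4]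
  have m1 : s[i.toNat] ≤ s[j.toNat] := hmono i.toNat j.toNat (by omega) (by omega) (by omega)
  have m2 : s[(i + 1).toNat] ≤ s[(j + 1).toNat] :=
    hmono (i + 1).toNat (j + 1).toNat (by omega) (by omega) (by omega)
  omega

-- ===== VERDICT (by name: the statement is the Claim_ definition above) =====
theorem aPrizeNoOneCanWin_spec : Claim_equal_aPrizeNoOneCanWin := by
  intro numItems maxCost items _ hpre
  unfold Spec_aPrizeNoOneCanWin aPrizeNoOneCanWin aPrizeNoOneCanWin_alt
  by_cases h1 : numItems = 1
  · subst h1; simp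
  · simp only [h1, if_false, reduceIte]
    by_cases h2 : numItems < 2
    · -- numItems ≤ 0: empty range on both sides
      rw [PySem.List.pyRange_one_eq_nil (by omega)]
      simp [aScan, h2]
    · have hlen : numItems ≤ (items.length : Int) := by
        rcases hpre with h | h
        · omega
        · exact h
      simp only [h2, if_false, reduceIte]
      rw [aScan_eq_firstV maxCost _ numItems 0 (numItems - 1) (by omega),
        bsLoop_eq_firstV maxCost _ 0 (numItems - 1) (by omega)
          (fun i j hi hij hj => pvP_mono maxCost items numItems hlen i j hi hij (by omega))]
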